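-- pv_equiv track=rewrite | github.com/zouxunlong/data_process | data_ASR/test.py | extract_speaker_info
-- ===== SOURCE A (Python) =====
-- def extract_speaker_info(metadata):
--     """Extract speaker information from metadata."""
--     speakers = {}
--
--     # Parse speaker codes
--     if 'SCD' in metadata:
--         speaker_codes = metadata['SCD'].split(',')
--     else:
--         speaker_codes = []
--
--     # Parse gender info
--     gender_info = {}
--     if 'SEX' in metadata:
--         for item in metadata['SEX'].split(','):
--             if '_' in item:
--                 speaker, gender = item.split('_', 1)
--                 gender_info[speaker] = gender
--
--     # Parse age info
--     age_info = {}
--     if 'AGE' in metadata: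
--         for item in metadata['AGE'].split(','):
--             if '_' in item:
--                 speaker, age = item.split('_', 1)
--                 age_info[speaker] = age
--
--     # Parse accent info
--     accent_info = {}
--     if 'ACC' in metadata:
--         for item in metadata['ACC'].split(','):
--             if '_' in item:
--                 speaker, accent = item.split('_', 1)
--                 accent_info[speaker] = accent
--
--     for speaker_code in speaker_codes:
--         speaker_data = {
--             'speaker_id': speaker_code,
--             'gender'    : gender_info.get(speaker_code, 'unknown'),
--             'age'       : age_info.get(speaker_code, 'unknown'),
--             'accent'    : accent_info.get(speaker_code, 'unknown')
--         }
--         speakers[speaker_code] = speaker_data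
--
--     return speakers
-- ===== SOURCE B (Python) =====
-- def extract_speaker_info(metadata):
--     """Extract speaker information from metadata."""
--
--     def lookup(key, code):
--         # Last matching "<code>_<value>" item wins, like repeated dict assignment.
--         if key in metadata:
--             for item in reversed(metadata[key].split(',')):
--                 if '_' in item:
--                     speaker, value = item.split('_', 1)
--                     if speaker == code:
--                         return value
--         return 'unknown'
--
--     codes = metadata['SCD'].split(',') if 'SCD' in metadata else []
--     return {code: {'speaker_id': code,
--                    'gender': lookup('SEX', code),
--                    'age': lookup('AGE', code),
--                    'accent': lookup('ACC', code)}
--             for code in codes}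
-- ===== Notes on version B (the rewrite author's own statement) =====
-- stated objective: alternative
-- what changed: Replaces the three pre-built speaker->value index dicts and the final assembly loop by a single dict comprehension over the speaker codes whose fields are found by a direct reverse scan (last assignment wins) of the relevant metadata field.
import Mathlib
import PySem

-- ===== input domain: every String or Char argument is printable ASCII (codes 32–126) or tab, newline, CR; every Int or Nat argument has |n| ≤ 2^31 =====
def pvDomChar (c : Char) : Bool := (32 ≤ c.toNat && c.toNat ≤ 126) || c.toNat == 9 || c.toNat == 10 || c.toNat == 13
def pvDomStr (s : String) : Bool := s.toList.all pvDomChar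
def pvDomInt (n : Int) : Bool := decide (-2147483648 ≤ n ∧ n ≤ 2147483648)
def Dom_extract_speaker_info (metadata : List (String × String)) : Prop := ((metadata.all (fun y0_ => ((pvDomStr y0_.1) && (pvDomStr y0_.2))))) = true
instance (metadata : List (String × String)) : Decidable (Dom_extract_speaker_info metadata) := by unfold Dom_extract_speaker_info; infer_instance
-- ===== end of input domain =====

-- B replaces A's three pre-built index dicts + assembly loop by per-code reverse scans of the fields; objective: alternative (same results, different traversal).

-- shared primitive: item.split('_', 1) when '_' is in item (exactly two pieces then)
def splitOnce (item : String) : String × String :=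
  match PySem.Str.splitMax? item "_" 1 with
  | some [a, b] => (a, b)
  | some [a] => (a, "")
  | _ => ("", "")

-- ===== PORT A =====
-- the loop A repeats verbatim for 'SEX', 'AGE' and 'ACC': build speaker->value dict
def buildInfo (md : PySem.Dict String String) (key : String) : PySem.Dict String String :=
  match md.get? key with
  | none => PySem.Dict.empty
  | some s =>
      ((PySem.Str.split? s ",").getD []).foldl
        (fun d item =>
          if PySem.Str.isIn "_" item then
            d.insert (splitOnce item).1 (splitOnce item).2
          else d)
        PySem.Dict.empty

def extract_speaker_info (metadata : List (String × String)) : List (String × List (String × String)) :=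
  let md := PySem.Dict.mk metadata
  let speaker_codes :=
    match md.get? "SCD" with
    | some s => (PySem.Str.split? s ",").getD []
    | none => []
  let gender_info := buildInfo md "SEX"
  let age_info := buildInfo md "AGE"
  let accent_info := buildInfo md "ACC"
  (speaker_codes.foldl
    (fun (speakers : PySem.Dict String (List (String × String))) code =>
      speakers.insert code
        [("speaker_id", code),
         ("gender", gender_info.getD code "unknown"),
         ("age", age_info.getD code "unknown"),
         ("accent", accent_info.getD code "unknown")])
    (PySem.Dict.empty : PySem.Dict String (List (String × String)))).items

-- ===== PORT B =====
-- scan the reversed item list, returning the value of the first hit (= last assignment)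
def scanRev (items : List String) (code : String) : String :=
  match items with
  | [] => "unknown"
  | item :: rest =>
      if PySem.Str.isIn "_" item then
        if (splitOnce item).1 == code then (splitOnce item).2
        else scanRev rest code
      else scanRev rest code

def lookupField (md : PySem.Dict String String) (key code : String) : String :=
  match md.get? key with
  | none => "unknown"
  | some s => scanRev ((PySem.Str.split? s ",").getD []).reverse code

def extract_speaker_info_alt (metadata : List (String × String)) : List (String × List (String × String)) :=
  let md := PySem.Dict.mk metadata
  let codes :=
    match md.get? "SCD" with
    | some s => (PySem.Str.split? s ",").getD []
    | none => []
  (codes.foldl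
    (fun (d : PySem.Dict String (List (String × String))) code =>
      d.insert code
        [("speaker_id", code),
         ("gender", lookupField md "SEX" code),
         ("age", lookupField md "AGE" code),
         ("accent", lookupField md "ACC" code)])
    (PySem.Dict.empty : PySem.Dict String (List (String × String)))).items

-- ===== PRECONDITION & SPEC =====
def Spec_extract_speaker_info (metadata : List (String × String)) (out : List (String × List (String × String))) : Prop := out = extract_speaker_info_alt metadata
instance (metadata : List (String × String)) (out : List (String × List (String × String))) : Decidable (Spec_extract_speaker_info metadata out) := by unfold Spec_extract_speaker_info; infer_instance

-- ===== CLAIM (what is proved, stated in full; the proofs are below) =====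
def Claim_equal_extract_speaker_info : Prop := ∀ (metadata : List (String × String)), Dom_extract_speaker_info metadata → Spec_extract_speaker_info metadata (extract_speaker_info metadata)

-- ===== LEMMAS AND PROOFS =====

-- abbreviation for A's per-field fold step
def infoStep (d : PySem.Dict String String) (item : String) : PySem.Dict String String :=
  if PySem.Str.isIn "_" item then d.insert (splitOnce item).1 (splitOnce item).2 else d

-- first matching item's value, as an Option
def scan? (items : List String) (code : String) : Option String :=
  items.findSome? (fun item =>
    if PySem.Str.isIn "_" item ∧ (splitOnce item).1 = code then some (splitOnce item).2 else none)

lemma scanRev_eq_scan? (items : List String) (code : String) :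
    scanRev items code = (scan? items code).getD "unknown" := by
  induction items with
  | nil => rfl
  | cons item rest ih =>
      simp only [scanRev, scan?, List.findSome?_cons]
      by_cases h1 : PySem.Chars.isIn ['_'] item.toList = true
      · by_cases h2 : (splitOnce item).1 = code
        · simp [h1, h2]
        · simp [h1, h2, ih, scan?]
      · simp [h1, ih, scan?]

lemma getD_infoStep (d : PySem.Dict String String) (item code : String) (u : String) :
    (infoStep d item).getD code u = (scan? [item] code).getD (d.getD code u) := by
  simp only [infoStep, scan?, List.findSome?_cons, List.findSome?_nil]
  by_cases h1 : PySem.Chars.isIn ['_'] item.toList = true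
  · by_cases h2 : (splitOnce item).1 = code
    · simp [h1, h2]
    · simp [h1, h2, Ne.symm h2, PySem.Dict.getD_insert]
  · simp [h1]

lemma foldl_infoStep_getD (items : List String) (d : PySem.Dict String String) (code u : String) :
    (items.foldl infoStep d).getD code u = (scan? items.reverse code).getD (d.getD code u) := by
  induction items generalizing d with
  | nil => rfl
  | cons item rest ih =>
      simp only [List.foldl_cons, List.reverse_cons]
      rw [ih, getD_infoStep]
      unfold scan?
      rw [List.findSome?_append]
      cases hfs : List.findSome? (fun item =>
          if PySem.Str.isIn "_" item ∧ (splitOnce item).1 = code then some (splitOnce item).2 else none)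
          rest.reverse <;> simp

lemma lookupField_eq (md : PySem.Dict String String) (key code : String) :
    lookupField md key code = (buildInfo md key).getD code "unknown" := by
  cases hk : md.get? key with
  | none => simp [lookupField, buildInfo, hk, PySem.Dict.getD_empty]
  | some s =>
      simp only [lookupField, buildInfo, hk]
      have hb : ∀ items : List String,
          (items.foldl (fun d item =>
              if PySem.Str.isIn "_" item then d.insert (splitOnce item).1 (splitOnce item).2 else d)
            PySem.Dict.empty).getD code "unknown"
            = (scan? items.reverse code).getD "unknown" := by
        intro items
        have := foldl_infoStep_getD items PySem.Dict.empty code "unknown"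
        simpa [infoStep, PySem.Dict.getD_empty] using this
      rw [hb, scanRev_eq_scan?]

theorem extract_speaker_info_eq_alt (metadata : List (String × String)) :
    extract_speaker_info metadata = extract_speaker_info_alt metadata := by
  unfold extract_speaker_info extract_speaker_info_alt
  simp only [lookupField_eq]

-- ===== VERDICT (by name: the statement is the Claim_ definition above) =====
theorem extract_speaker_info_spec : Claim_equal_extract_speaker_info := by
  intro metadata _
  exact extract_speaker_info_eq_alt metadata
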